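-- pv_equiv track=rewrite | github.com/cardona18/ifacotesting | ireport_custom/models/ireport_report.py | back_dir
-- ===== SOURCE A (Python) =====
-- def back_dir(_path, _positions):
--     # Returns number of positions in path
--
--     path_list = _path.strip('/').split('/')
--     length = len(path_list)
--
--     if(_positions >= length or _positions < 0):
--             return ''
--
--     for i in range(0, _positions):
--             path_list.pop()
--
--     return "/%s" % "/".join(path_list)
-- ===== SOURCE B (Python) =====
-- def back_dir(_path, _positions):
--     # Drop the last _positions segments with one rsplit instead of split+pop loop
--     stripped = _path.strip('/')
--     length = stripped.count('/') + 1
--     if _positions >= length or _positions < 0: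
--         return ''
--     return "/%s" % stripped.rsplit('/', _positions)[0]
-- ===== Notes on version B (the rewrite author's own statement) =====
-- stated objective: simpler
-- what changed: B never builds or mutates a segment list: it computes the guard length as stripped.count('/')+1 and drops the last _positions segments with a single stripped.rsplit('/', _positions)[0], replacing A's split-into-list plus pop loop.
import Mathlib
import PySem

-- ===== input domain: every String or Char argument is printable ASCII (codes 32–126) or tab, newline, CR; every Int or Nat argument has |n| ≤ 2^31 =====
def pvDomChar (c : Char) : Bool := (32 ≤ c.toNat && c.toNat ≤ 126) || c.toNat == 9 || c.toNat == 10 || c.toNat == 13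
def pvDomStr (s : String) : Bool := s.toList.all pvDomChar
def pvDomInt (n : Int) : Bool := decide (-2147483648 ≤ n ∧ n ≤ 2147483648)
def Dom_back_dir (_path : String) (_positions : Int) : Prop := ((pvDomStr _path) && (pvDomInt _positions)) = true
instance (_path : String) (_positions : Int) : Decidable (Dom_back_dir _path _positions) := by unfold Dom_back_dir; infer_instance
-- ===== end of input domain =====

-- B replaces A's split-into-list-then-pop-loop by count('/')+1 for the guard and a single
-- right-split of the stripped string (rsplit('/', n)[0]) — simpler, no list is built or mutated.

-- ===== PORT A =====
def back_dir (_path : String) (_positions : Int) : String :=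
  let path_list := PySem.Chars.splitOn (PySem.Chars.stripChars _path.toList ['/']) ['/']
  let length : Int := path_list.length
  if _positions ≥ length ∨ _positions < 0 then ""
  else
    let path_list := (PySem.List.pyRange 0 _positions 1).foldl
      (fun acc _ => match PySem.List.pop? acc with  -- path_list.pop(); none is unreachable (the guard keeps the list nonempty)
        | some (_, rest) => rest
        | none => acc)
      path_list
    String.mk ('/' :: PySem.Chars.join ['/'] path_list)   -- "/%s" % "/".join(path_list)

-- ===== PORT B =====
-- hand port of one step of stripped.rsplit('/', n): from the right, drop one segment and its
-- separator; exact for the single-char separator '/' when n ≤ number of '/' (the guard gives that)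
def pvRsplitStep (r : List Char) : List Char := (r.dropWhile (· != '/')).tail

def back_dir_alt (_path : String) (_positions : Int) : String :=
  let stripped := PySem.Chars.stripChars _path.toList ['/']
  let length : Int := (PySem.Chars.count stripped ['/'] : Int) + 1
  if _positions ≥ length ∨ _positions < 0 then ""
  else
    -- "/%s" % stripped.rsplit('/', _positions)[0]
    String.mk ('/' :: (pvRsplitStep^[_positions.toNat] stripped.reverse).reverse)

-- ===== PRECONDITION & SPEC =====
def Spec_back_dir (_path : String) (_positions : Int) (out : String) : Prop := out = back_dir_alt _path _positions
instance (_path : String) (_positions : Int) (out : String) : Decidable (Spec_back_dir _path _positions out) := by unfold Spec_back_dir; infer_instance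

-- ===== CLAIM (what is proved, stated in full; the proofs are below) =====
def Claim_equal_back_dir : Prop := ∀ (_path : String) (_positions : Int), Dom_back_dir _path _positions → Spec_back_dir _path _positions (back_dir _path _positions)

-- ===== LEMMAS AND PROOFS =====

-- structural single-char split, the proof-side characterisation of splitOn … ['/']
def pvSplit1 : List Char → List (List Char)
  | [] => [[]]
  | c :: rest => if c = '/' then [] :: pvSplit1 rest else (pvSplit1 rest).modifyHead (c :: ·)

theorem pvSplit1_ne_nil (cs : List Char) : pvSplit1 cs ≠ [] := by
  induction cs with
  | nil => simp [pvSplit1]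
  | cons c rest ih =>
    simp only [pvSplit1]
    split_ifs
    · simp
    · cases h : pvSplit1 rest with
      | nil => exact absurd h ih
      | cons a t => simp [List.modifyHead]

theorem pvSplit1_length (cs : List Char) : (pvSplit1 cs).length = cs.count '/' + 1 := by
  induction cs with
  | nil => simp [pvSplit1]
  | cons c rest ih =>
    simp only [pvSplit1]
    split_ifs with h
    · subst h; simp [List.count_cons, ih]
    · cases hs : pvSplit1 rest with
      | nil => exact absurd hs (pvSplit1_ne_nil rest)
      | cons a t =>
        have h2 := ih; rw [hs] at h2
        simp only [List.length_cons] at h2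
        have hc : (c == '/') = false := by simp [h]
        simp [List.modifyHead_cons, List.count_cons, hc]
        omega

theorem pvInter_cons₂ (a b : List Char) (t : List (List Char)) :
    ['/'].intercalate (a :: b :: t) = a ++ '/' :: ['/'].intercalate (b :: t) := by
  simp [List.intercalate, List.intersperse_cons₂]

theorem pvSplit1_intercalate (cs : List Char) : ['/'].intercalate (pvSplit1 cs) = cs := by
  induction cs with
  | nil => simp [pvSplit1, List.intercalate]
  | cons c rest ih =>
    simp only [pvSplit1]
    split_ifs with h
    · subst h
      cases hs : pvSplit1 rest with
      | nil => exact absurd hs (pvSplit1_ne_nil rest)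
      | cons a t =>
        rw [hs] at ih
        rw [pvInter_cons₂, ih]
        simp
    · cases hs : pvSplit1 rest with
      | nil => exact absurd hs (pvSplit1_ne_nil rest)
      | cons a t =>
        rw [hs] at ih
        cases t with
        | nil =>
          simp only [List.modifyHead_cons, List.intercalate, List.intersperse_single,
            List.flatten, List.append_nil] at ih ⊢
          simpa using ih
        | cons b t' =>
          rw [List.modifyHead_cons, pvInter_cons₂, List.cons_append]
          rw [pvInter_cons₂] at ih
          rw [ih]

theorem pvSplit1_no_sep (cs : List Char) : ∀ s ∈ pvSplit1 cs, '/' ∉ s := by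
  induction cs with
  | nil => simp [pvSplit1]
  | cons c rest ih =>
    simp only [pvSplit1]
    split_ifs with h
    · intro s hs
      rcases List.mem_cons.mp hs with rfl | hmem
      · simp
      · exact ih s hmem
    · cases hs : pvSplit1 rest with
      | nil => exact absurd hs (pvSplit1_ne_nil rest)
      | cons a t =>
        intro s hmem
        rw [hs] at ih
        simp only [List.modifyHead_cons, List.mem_cons] at hmem
        rcases hmem with rfl | hmem
        · intro hm
          rcases List.mem_cons.mp hm with rfl | hm
          · exact h rfl
          · exact ih a (by simp) hm
        · exact ih s (by simp [hmem])

theorem pvSplitOn_go_single (fuel : Nat) : ∀ (l cur : List Char) (acc : List (List Char)),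
    l.length ≤ fuel →
    PySem.Chars.splitOn.go ['/'] fuel l cur acc
      = acc.reverse ++ (pvSplit1 l).modifyHead (cur.reverse ++ ·) := by
  induction fuel with
  | zero =>
    intro l cur acc hl
    have : l = [] := List.length_eq_zero_iff.mp (Nat.le_zero.mp hl)
    subst this
    simp [PySem.Chars.splitOn.go, pvSplit1, List.modifyHead]
  | succ f ih =>
    intro l cur acc hl
    cases l with
    | nil => simp [PySem.Chars.splitOn.go, pvSplit1, List.modifyHead]
    | cons c rest =>
      by_cases h : c = '/'
      · subst h
        have hpre : (['/'] : List Char).isPrefixOf ('/' :: rest) = true := by simp [List.isPrefixOf]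
        rw [show PySem.Chars.splitOn.go ['/'] (f+1) ('/' :: rest) cur acc
              = PySem.Chars.splitOn.go ['/'] f rest [] (cur.reverse :: acc) by
            simp [PySem.Chars.splitOn.go, hpre, List.drop]]
        rw [ih rest [] (cur.reverse :: acc) (by simpa using Nat.lt_succ_iff.mp (by simpa using hl))]
        cases hs : pvSplit1 rest with
        | nil => exact absurd hs (pvSplit1_ne_nil rest)
        | cons a t => simp [pvSplit1, List.modifyHead, hs]
      · have hpre : (['/'] : List Char).isPrefixOf (c :: rest) = false := by
          simp only [List.isPrefixOf, Bool.and_eq_false_iff, beq_eq_false_iff_ne, ne_eq]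
          exact Or.inl fun he => h he.symm
        rw [show PySem.Chars.splitOn.go ['/'] (f+1) (c :: rest) cur acc
              = PySem.Chars.splitOn.go ['/'] f rest (c :: cur) acc by
            simp [PySem.Chars.splitOn.go, hpre, List.drop]]
        rw [ih rest (c :: cur) acc (by simpa using Nat.lt_succ_iff.mp (by simpa using hl))]
        cases hs : pvSplit1 rest with
        | nil => exact absurd hs (pvSplit1_ne_nil rest)
        | cons a t => simp [pvSplit1, List.modifyHead, hs, h]

theorem pvSplitOn_single (cs : List Char) : PySem.Chars.splitOn cs ['/'] = pvSplit1 cs := by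
  rw [PySem.Chars.splitOn, pvSplitOn_go_single (cs.length + 1) cs [] [] (Nat.le_succ _)]
  cases hs : pvSplit1 cs with
  | nil => exact absurd hs (pvSplit1_ne_nil cs)
  | cons a t => simp [List.modifyHead]

theorem pvCount_go_single (fuel : Nat) : ∀ (l : List Char) (acc : Nat),
    l.length ≤ fuel →
    PySem.Chars.count.go ['/'] fuel l acc = acc + l.count '/' := by
  induction fuel with
  | zero =>
    intro l acc hl
    have : l = [] := List.length_eq_zero_iff.mp (Nat.le_zero.mp hl)
    subst this; simp [PySem.Chars.count.go]
  | succ f ih =>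
    intro l acc hl
    cases l with
    | nil => simp [PySem.Chars.count.go]
    | cons c rest =>
      by_cases h : c = '/'
      · subst h
        have hpre : (['/'] : List Char).isPrefixOf ('/' :: rest) = true := by simp [List.isPrefixOf]
        rw [show PySem.Chars.count.go ['/'] (f+1) ('/' :: rest) acc
              = PySem.Chars.count.go ['/'] f rest (acc + 1) by
            simp [PySem.Chars.count.go, hpre, List.drop]]
        rw [ih rest (acc + 1) (by simpa using Nat.lt_succ_iff.mp (by simpa using hl))]
        simp [List.count_cons]; omega
      · have hpre : (['/'] : List Char).isPrefixOf (c :: rest) = false := by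
          simp only [List.isPrefixOf, Bool.and_eq_false_iff, beq_eq_false_iff_ne, ne_eq]
          exact Or.inl fun he => h he.symm
        rw [show PySem.Chars.count.go ['/'] (f+1) (c :: rest) acc
              = PySem.Chars.count.go ['/'] f rest acc by
            simp [PySem.Chars.count.go, hpre, List.drop]]
        rw [ih rest acc (by simpa using Nat.lt_succ_iff.mp (by simpa using hl))]
        simp [h]

theorem pvCount_single (cs : List Char) : PySem.Chars.count cs ['/'] = cs.count '/' := by
  rw [PySem.Chars.count]
  simp only [List.isEmpty_cons, if_false, Bool.false_eq_true]
  exact (pvCount_go_single cs.length cs 0 le_rfl).trans (by omega)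

theorem pvFoldl_const_iterate {α β : Type} (f : α → α) (l : List β) :
    ∀ (init : α), l.foldl (fun acc _ => f acc) init = f^[l.length] init := by
  induction l with
  | nil => intro init; simp
  | cons x t ih => intro init; simp [List.foldl_cons, ih, Function.iterate_succ_apply]

theorem pvInter_concat (M : List (List Char)) (a : List Char) (h : M ≠ []) :
    ['/'].intercalate (M ++ [a]) = ['/'].intercalate M ++ '/' :: a := by
  induction M with
  | nil => exact absurd rfl h
  | cons m M' ih =>
    cases M' with
    | nil => simp [List.intercalate]
    | cons m' M'' =>
      have h2 := ih (by simp)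
      simp only [List.cons_append] at h2 ⊢
      rw [pvInter_cons₂, h2, pvInter_cons₂]
      simp

theorem pvRsplitStep_concat (M : List (List Char)) (a : List Char) (hM : M ≠ []) (ha : '/' ∉ a) :
    pvRsplitStep (['/'].intercalate (M ++ [a])).reverse = (['/'].intercalate M).reverse := by
  rw [pvInter_concat M a hM]
  have hall : a.reverse.dropWhile (· != '/') = [] := by
    rw [List.dropWhile_eq_nil_iff]
    intro x hx
    simp only [bne_iff_ne, ne_eq]
    intro hxe; exact ha (by simpa [hxe] using List.mem_reverse.mp hx)
  have hshape : (['/'].intercalate M ++ '/' :: a).reverse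
      = a.reverse ++ '/' :: (['/'].intercalate M).reverse := by simp
  rw [show pvRsplitStep (['/'].intercalate M ++ '/' :: a).reverse
        = ((['/'].intercalate M ++ '/' :: a).reverse.dropWhile (· != '/')).tail from rfl]
  rw [hshape, List.dropWhile_append, hall]
  simp

theorem pvMain (n : Nat) : ∀ (L : List (List Char)), L ≠ [] → (∀ s ∈ L, '/' ∉ s) →
    n < L.length →
    (pvRsplitStep^[n] (['/'].intercalate L).reverse).reverse
      = ['/'].intercalate (List.dropLast^[n] L) := by
  induction n with
  | zero => intro L _ _ _; simp
  | succ k ih =>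
    intro L hL hseg hn
    have hlen2 : 2 ≤ L.length := by
      have := hn; omega
    have hsplit : L.dropLast ++ [L.getLast hL] = L := List.dropLast_append_getLast hL
    have hMne : L.dropLast ≠ [] := by
      intro h
      have : L.length ≤ 1 := by
        have := congrArg List.length hsplit
        simp [h] at this; omega
      omega
    rw [Function.iterate_succ_apply]
    rw [show (['/'].intercalate L).reverse = (['/'].intercalate (L.dropLast ++ [L.getLast hL])).reverse by rw [hsplit]]
    rw [pvRsplitStep_concat L.dropLast (L.getLast hL) hMne
          (hseg _ (List.getLast_mem hL))]
    rw [ih L.dropLast hMne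
          (fun s hs => hseg s (List.mem_of_mem_dropLast hs))
          (by simp [List.length_dropLast]; omega)]
    rw [Function.iterate_succ_apply]

-- the loop body of A is 'drop the last element'
theorem pvPopFun_eq :
    (fun (acc : List (List Char)) (_ : Int) =>
      (match PySem.List.pop? acc with
        | some (_, rest) => rest
        | none => acc)) = fun acc _ => acc.dropLast := by
  funext acc x
  induction acc using List.reverseRecOn with
  | nil => simp [PySem.List.pop?, PySem.List.pyIdx?]
  | append_singleton ys y _ => rw [PySem.List.pop?_last]; simp

theorem pvRange_len (p : Int) (hp : 0 ≤ p) : (PySem.List.pyRange 0 p 1).length = p.toNat := by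
  rw [show p = ((p.toNat : Nat) : Int) from (Int.toNat_of_nonneg hp).symm,
    PySem.List.pyRange_zero_natCast]
  simp
  omega

-- ===== VERDICT (by name: the statement is the Claim_ definition above) =====
theorem back_dir_spec : Claim_equal_back_dir := by
  intro _path _positions _hdom
  simp only [Spec_back_dir, back_dir, back_dir_alt]
  set cs := PySem.Chars.stripChars _path.toList ['/'] with hcs
  rw [pvSplitOn_single cs, pvCount_single cs]
  have hlen : ((pvSplit1 cs).length : Int) = (cs.count '/' : Int) + 1 := by
    rw [pvSplit1_length cs]; push_cast; ring
  rw [hlen]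
  split_ifs with hguard
  · rfl
  · rw [not_or] at hguard
    obtain ⟨h1, h2⟩ := hguard
    have hpos : 0 ≤ _positions := by omega
    rw [pvPopFun_eq, pvFoldl_const_iterate, pvRange_len _positions hpos]
    have hn : _positions.toNat < (pvSplit1 cs).length := by
      rw [pvSplit1_length cs]; omega
    have hmain := pvMain _positions.toNat (pvSplit1 cs) (pvSplit1_ne_nil cs) (pvSplit1_no_sep cs) hn
    rw [pvSplit1_intercalate cs] at hmain
    rw [show PySem.Chars.join ['/'] (List.dropLast^[_positions.toNat] (pvSplit1 cs))
          = ['/'].intercalate (List.dropLast^[_positions.toNat] (pvSplit1 cs)) from rfl,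
      ← hmain]
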